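-- pv_equiv track=rewrite | github.com/skinnynoonie/aoc-2024 | 7/p1.py | recursive_compute
-- ===== SOURCE A (Python) =====
-- def recursive_compute(numbers, current_value, current_index, goal_value):
--     current_number = numbers[current_index]
--     if current_index == len(numbers) - 1:
--         return (
--             current_value + current_number == goal_value or
--             current_value * current_number == goal_value
--         )
--
--     return (
--         recursive_compute(numbers, current_value + current_number, current_index + 1, goal_value) or
--         recursive_compute(numbers, current_value * current_number, current_index + 1, goal_value)
--     )
-- ===== SOURCE B (Python) =====
-- def recursive_compute(numbers, current_value, current_index, goal_value):
--     reachable = {current_value}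
--     for idx in range(current_index, len(numbers)):
--         num = numbers[idx]
--         reachable = {v + num for v in reachable} | {v * num for v in reachable}
--     return goal_value in reachable
-- ===== Notes on version B (the rewrite author's own statement) =====
-- stated objective: alternative
-- what changed: Replaced the exponential depth-first recursion over all +/* operator sequences by a single iterative left-to-right pass that maintains the set of values reachable so far and checks goal membership at the end.
import Mathlib
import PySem

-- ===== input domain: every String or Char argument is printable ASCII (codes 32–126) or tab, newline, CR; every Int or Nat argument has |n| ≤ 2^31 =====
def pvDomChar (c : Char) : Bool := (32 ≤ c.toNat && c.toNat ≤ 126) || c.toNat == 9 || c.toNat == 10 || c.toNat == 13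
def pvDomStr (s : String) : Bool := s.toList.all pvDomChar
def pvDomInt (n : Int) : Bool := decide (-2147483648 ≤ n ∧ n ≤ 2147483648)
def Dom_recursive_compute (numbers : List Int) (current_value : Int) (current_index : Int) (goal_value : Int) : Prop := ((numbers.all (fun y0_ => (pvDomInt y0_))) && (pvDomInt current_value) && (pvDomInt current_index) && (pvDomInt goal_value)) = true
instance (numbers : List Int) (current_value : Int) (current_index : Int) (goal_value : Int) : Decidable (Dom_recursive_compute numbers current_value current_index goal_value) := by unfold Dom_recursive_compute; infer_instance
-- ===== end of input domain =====

-- B replaces A's depth-first recursion over operator choices by one iterative breadth-first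
-- pass that keeps the set of reachable values (alternative decomposition, same worst-case cost).


-- ===== PORT A =====
-- literal port of A; the `none` branch is Python's IndexError (excluded by Pre_)
def recursive_compute (numbers : List Int) (current_value : Int) (current_index : Int) (goal_value : Int) : Bool :=
  match h : PySem.List.pyGet? numbers current_index with
  | none => false
  | some current_number =>
    if current_index == (numbers.length : Int) - 1 then
      (current_value + current_number == goal_value) || (current_value * current_number == goal_value)
    else
      recursive_compute numbers (current_value + current_number) (current_index + 1) goal_value ||
      recursive_compute numbers (current_value * current_number) (current_index + 1) goal_value
termination_by ((numbers.length : Int) - current_index).toNat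
decreasing_by
  all_goals
    have hin : PySem.Raise.InRange numbers.length current_index := by
      by_contra hc
      rw [← PySem.List.pyGet?_eq_none_iff (xs := numbers)] at hc
      simp [hc] at h
    simp only [PySem.Raise.InRange] at hin
    omega

-- ===== PORT B =====
-- literal port of B: frontier set of reachable values, one pass over numbers[current_index:]
def recursive_compute_alt (numbers : List Int) (current_value : Int) (current_index : Int) (goal_value : Int) : Bool :=
  let final :=
    (PySem.List.pyRange current_index (numbers.length : Int) 1).foldl
      (fun reachable idx =>
        let num := PySem.List.pyGetD numbers idx 0
        PySem.Set.union (PySem.Set.ofList (reachable.map (fun v => v + num)))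
                        (reachable.map (fun v => v * num)))
      (PySem.Set.ofList [current_value])
  final.contains goal_value

-- ===== PRECONDITION & SPEC =====
-- Pre_ excludes exactly the inputs where A raises IndexError on numbers[current_index]
def Pre_recursive_compute (numbers : List Int) (current_value : Int) (current_index : Int) (goal_value : Int) : Prop :=
  PySem.Raise.InRange numbers.length current_index
instance (numbers : List Int) (current_value : Int) (current_index : Int) (goal_value : Int) : Decidable (Pre_recursive_compute numbers current_value current_index goal_value) := by unfold Pre_recursive_compute; infer_instance
def pvWitness_recursive_compute : List Int × Int × Int × Int := ([2, 3, 4], 1, 0, 20)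

def Spec_recursive_compute (numbers : List Int) (current_value : Int) (current_index : Int) (goal_value : Int) (out : Bool) : Prop := out = recursive_compute_alt numbers current_value current_index goal_value
instance (numbers : List Int) (current_value : Int) (current_index : Int) (goal_value : Int) (out : Bool) : Decidable (Spec_recursive_compute numbers current_value current_index goal_value out) := by unfold Spec_recursive_compute; infer_instance

-- ===== CLAIM (what is proved, stated in full; the proofs are below) =====
def Claim_equal_recursive_compute : Prop := ∀ (numbers : List Int) (current_value : Int) (current_index : Int) (goal_value : Int), Dom_recursive_compute numbers current_value current_index goal_value → Pre_recursive_compute numbers current_value current_index goal_value → Spec_recursive_compute numbers current_value current_index goal_value (recursive_compute numbers current_value current_index goal_value)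

-- ===== LEMMAS AND PROOFS =====

-- an in-range pyGet? returns exactly the pyGetD value
lemma pyGet?_eq_some_pyGetD (xs : List Int) (i : Int) (d : Int)
    (h : PySem.Raise.InRange xs.length i) :
    PySem.List.pyGet? xs i = some (PySem.List.pyGetD xs i d) := by
  cases hx : PySem.List.pyGet? xs i with
  | none => exact absurd ((PySem.List.pyGet?_eq_none_iff xs i).mp hx) (not_not_intro h)
  | some x => simp [PySem.List.pyGetD, hx]

-- one frontier step
def pvStep (numbers : List Int) (reachable : List Int) (idx : Int) : List Int :=
  let num := PySem.List.pyGetD numbers idx 0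
  PySem.Set.union (PySem.Set.ofList (reachable.map (fun v => v + num)))
                  (reachable.map (fun v => v * num))

lemma mem_pvStep (numbers S : List Int) (idx x : Int) :
    x ∈ pvStep numbers S idx ↔
      ∃ v ∈ S, x = v + PySem.List.pyGetD numbers idx 0 ∨ x = v * PySem.List.pyGetD numbers idx 0 := by
  simp only [pvStep, PySem.Set.mem_union, PySem.Set.mem_ofList, List.mem_map]
  constructor
  · rintro (⟨v, hv, rfl⟩ | ⟨v, hv, rfl⟩) <;> exact ⟨v, hv, by simp⟩
  · rintro ⟨v, hv, (rfl | rfl)⟩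
    · exact Or.inl ⟨v, hv, rfl⟩
    · exact Or.inr ⟨v, hv, rfl⟩

-- main invariant: folding the frontier from index ci computes the disjunction of A over the frontier
lemma pvMain (numbers : List Int) (goal : Int) :
    ∀ (k : Nat) (ci : Int), ((numbers.length : Int) - ci).toNat = k →
      PySem.Raise.InRange numbers.length ci →
      ∀ S : List Int,
        ((PySem.List.pyRange ci (numbers.length : Int) 1).foldl (pvStep numbers) S).contains goal
          = S.any (fun v => recursive_compute numbers v ci goal) := by
  intro k
  induction k with
  | zero =>
    intro ci hk hin S
    simp only [PySem.Raise.InRange] at hin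
    omega
  | succ n ih =>
    intro ci hk hin S
    have hin' := hin
    simp only [PySem.Raise.InRange] at hin'
    have hget : PySem.List.pyGet? numbers ci = some (PySem.List.pyGetD numbers ci 0) :=
      pyGet?_eq_some_pyGetD numbers ci 0 hin
    rw [PySem.List.pyRange_one_cons (by omega), List.foldl_cons]
    by_cases hlast : ci = (numbers.length : Int) - 1
    · -- last element: remaining range is empty
      rw [show PySem.List.pyRange (ci + 1) (numbers.length : Int) 1 = [] from
            PySem.List.pyRange_one_eq_nil (by omega)]
      simp only [List.foldl_nil]
      rw [Bool.eq_iff_iff]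
      simp only [List.contains_iff_mem, mem_pvStep, List.any_eq_true]
      have hc : (ci == (numbers.length : Int) - 1) = true := by simpa using hlast
      constructor
      · rintro ⟨v, hv, h⟩
        refine ⟨v, hv, ?_⟩
        rw [recursive_compute, hget]
        simp only [hc, if_true]
        rcases h with rfl | rfl <;> simp
      · rintro ⟨v, hv, hA⟩
        rw [recursive_compute, hget] at hA
        simp only [hc, if_true] at hA
        refine ⟨v, hv, ?_⟩
        rcases Bool.or_eq_true_iff.mp hA with h | h
        · exact Or.inl (beq_iff_eq.mp h).symm
        · exact Or.inr (beq_iff_eq.mp h).symm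
    · -- not last: apply the induction hypothesis at ci + 1
      rw [ih (ci + 1) (by omega) (by simp only [PySem.Raise.InRange]; omega) (pvStep numbers S ci)]
      rw [Bool.eq_iff_iff]
      simp only [List.any_eq_true, mem_pvStep]
      constructor
      · rintro ⟨x, ⟨v, hv, h⟩, hA⟩
        refine ⟨v, hv, ?_⟩
        rw [recursive_compute, hget]
        have hne : (ci == (numbers.length : Int) - 1) = false := by
          simpa using hlast
        simp only [hne, Bool.false_eq_true, if_false, Bool.or_eq_true_iff]
        rcases h with rfl | rfl
        · exact Or.inl hA
        · exact Or.inr hA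
      · rintro ⟨v, hv, hA⟩
        rw [recursive_compute, hget] at hA
        have hne : (ci == (numbers.length : Int) - 1) = false := by
          simpa using hlast
        simp only [hne, Bool.false_eq_true, if_false, Bool.or_eq_true_iff] at hA
        rcases hA with h | h
        · exact ⟨v + PySem.List.pyGetD numbers ci 0, ⟨v, hv, Or.inl rfl⟩, h⟩
        · exact ⟨v * PySem.List.pyGetD numbers ci 0, ⟨v, hv, Or.inr rfl⟩, h⟩

-- ===== VERDICT (by name: the statement is the Claim_ definition above) =====
theorem recursive_compute_spec : Claim_equal_recursive_compute := by
  intro numbers cv ci goal _ hpre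
  have h := pvMain numbers goal (((numbers.length : Int) - ci).toNat) ci rfl hpre
              (PySem.Set.ofList [cv])
  have h2 : [cv].any (fun v => recursive_compute numbers v ci goal)
      = recursive_compute numbers cv ci goal := by simp
  unfold Spec_recursive_compute recursive_compute_alt
  exact (h.trans h2).symm
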